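-- pv_equiv track=rewrite | github.com/baliga-lab/cmonkey2 | cmonkey/microbes_online.py | build_operons
-- ===== SOURCE A (Python) =====
-- def build_operons(names1, names2):
--     """build the list of operons given two name lists"""
--     def first_row_containing(alist, aname):
--         """returns in a list containing the specified name"""
--         for row in alist:
--             if aname in row:
--                 return row
--         return None
--
--     operons = []
--     for i in range(len(names1)):
--         found = first_row_containing(operons, names1[i])
--         if found:
--             found.append(names2[i])
--         else:
--             operons.append([names1[i], names2[i]])
--     return operons
-- ===== SOURCE B (Python) =====
-- def build_operons(names1, names2):
--     """build the list of operons given two name lists"""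
--     rows = []
--     first = {}  # name -> index of the first (earliest) row containing it
--     for n1, n2 in zip(names1, names2):
--         r = first.get(n1)
--         if r is None:
--             r = len(rows)
--             rows.append([n1, n2])
--             first[n1] = r
--             if n2 not in first:
--                 first[n2] = r
--         else:
--             rows[r].append(n2)
--             e = first.get(n2)
--             if e is None or e > r:
--                 first[n2] = r
--     return rows
-- ===== Notes on version B (the rewrite author's own statement) =====
-- stated objective: faster
-- what changed: Instead of rescanning all accumulated operon rows for each name (first_row_containing), B keeps a hash map from each name to the index of the earliest row containing it and does one O(1) lookup/update per pair.
import Mathlib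
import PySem

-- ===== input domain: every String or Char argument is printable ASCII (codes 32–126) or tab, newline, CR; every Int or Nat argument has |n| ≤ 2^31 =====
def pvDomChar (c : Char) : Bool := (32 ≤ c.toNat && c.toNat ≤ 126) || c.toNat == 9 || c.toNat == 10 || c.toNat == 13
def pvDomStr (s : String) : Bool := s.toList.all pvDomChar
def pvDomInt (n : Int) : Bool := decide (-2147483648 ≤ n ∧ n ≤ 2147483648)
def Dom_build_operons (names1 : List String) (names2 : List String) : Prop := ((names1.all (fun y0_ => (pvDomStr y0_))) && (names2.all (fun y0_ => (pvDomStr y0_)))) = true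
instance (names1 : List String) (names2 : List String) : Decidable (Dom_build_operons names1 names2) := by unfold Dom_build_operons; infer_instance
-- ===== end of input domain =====

-- B replaces A's linear rescan of all accumulated rows per name by a hash map from
-- each name to the index of the earliest row containing it: O(n) instead of O(n^2).
-- A mutates the found row in place; the equivalence proved here is about the return value.

-- ===== PORT A =====
-- first_row_containing: scan rows in order, return the first containing aname (None if none)
def firstRowContaining : List (List String) → String → Option (List String)
  | [], _ => none
  | row :: rest, aname => if aname ∈ row then some row else firstRowContaining rest aname

-- Python's `found.append(names2[i])` mutates the first matching row inside operons;
-- the port rewrites that row in place.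
def appendToFirst : List (List String) → String → String → List (List String)
  | [], _, _ => []
  | row :: rest, aname, v => if aname ∈ row then (row ++ [v]) :: rest else row :: appendToFirst rest aname v

-- one iteration of A's loop body; `if found:` is Python truthiness (None or empty list falsy)
def operonStep (operons : List (List String)) (n1 n2 : String) : List (List String) :=
  match firstRowContaining operons n1 with
  | some found => if found.isEmpty then operons ++ [[n1, n2]] else appendToFirst operons n1 n2
  | none => operons ++ [[n1, n2]]

-- for i in range(len(names1)): under Pre_ every index is in range, so the getD default is never used
def build_operons (names1 : List String) (names2 : List String) : List (List String) :=
  (List.range names1.length).foldl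
    (fun operons i => operonStep operons (names1.getD i "") (names2.getD i "")) []

-- ===== PORT B =====
-- state: (rows, first) where first maps a name to the index of the earliest row containing it
def altStep (st : List (List String) × PySem.Dict String Nat) (p : String × String) :
    List (List String) × PySem.Dict String Nat :=
  match PySem.Dict.get? st.2 p.1 with
  | some r =>
      let rows := st.1.modify r (fun row => row ++ [p.2])
      let first :=
        match PySem.Dict.get? st.2 p.2 with
        | some e => if r < e then st.2.insert p.2 r else st.2
        | none => st.2.insert p.2 r
      (rows, first)
  | none =>
      let r := st.1.length
      let first1 := st.2.insert p.1 r
      let first2 :=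
        match PySem.Dict.get? first1 p.2 with
        | some _ => first1
        | none => first1.insert p.2 r
      (st.1 ++ [[p.1, p.2]], first2)

def build_operons_alt (names1 : List String) (names2 : List String) : List (List String) :=
  ((names1.zip names2).foldl altStep ([], PySem.Dict.empty)).1

-- ===== PRECONDITION & SPEC =====
-- A indexes names2[i] for every i < len(names1) and raises IndexError when names2 is shorter.
def Pre_build_operons (names1 : List String) (names2 : List String) : Prop :=
  names1.length ≤ names2.length
instance (names1 : List String) (names2 : List String) : Decidable (Pre_build_operons names1 names2) := by unfold Pre_build_operons; infer_instance

def pvWitness_build_operons : List String × List String := (["a", "b", "a"], ["x", "y", "z"])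

def Spec_build_operons (names1 : List String) (names2 : List String) (out : List (List String)) : Prop := out = build_operons_alt names1 names2
instance (names1 : List String) (names2 : List String) (out : List (List String)) : Decidable (Spec_build_operons names1 names2 out) := by unfold Spec_build_operons; infer_instance

-- ===== CLAIM (what is proved, stated in full; the proofs are below) =====
def Claim_equal_build_operons : Prop := ∀ (names1 : List String) (names2 : List String), Dom_build_operons names1 names2 → Pre_build_operons names1 names2 → Spec_build_operons names1 names2 (build_operons names1 names2)

-- ===== LEMMAS AND PROOFS =====

-- index of the first row containing x (specification device for both ports)
def firstIdx : List (List String) → String → Option Nat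
  | [], _ => none
  | row :: rest, x => if x ∈ row then some 0 else (firstIdx rest x).map (· + 1)

lemma frc_none {rows : List (List String)} {x : String} (h : firstIdx rows x = none) :
    firstRowContaining rows x = none := by
  induction rows with
  | nil => rfl
  | cons row rest ih =>
    by_cases hx : x ∈ row
    · simp [firstIdx, hx] at h
    · simp [firstIdx, hx] at h
      simp [firstRowContaining, hx, ih h]

lemma frc_some {rows : List (List String)} {x : String} {r : Nat}
    (h : firstIdx rows x = some r) :
    ∃ row, firstRowContaining rows x = some row ∧ x ∈ row := by
  induction rows generalizing r with
  | nil => simp [firstIdx] at h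
  | cons row rest ih =>
    by_cases hx : x ∈ row
    · exact ⟨row, by simp [firstRowContaining, hx], hx⟩
    · simp [firstIdx, hx] at h
      obtain ⟨r', hr', -⟩ := h
      obtain ⟨row', h1, h2⟩ := ih hr'
      exact ⟨row', by simp [firstRowContaining, hx, h1], h2⟩

lemma appendToFirst_eq_modify {rows : List (List String)} {x : String} {r : Nat}
    (h : firstIdx rows x = some r) (v : String) :
    appendToFirst rows x v = rows.modify r (fun row => row ++ [v]) := by
  induction rows generalizing r with
  | nil => simp [firstIdx] at h
  | cons row rest ih =>
    by_cases hx : x ∈ row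
    · simp [firstIdx, hx] at h
      subst h
      simp [appendToFirst, hx, List.modify_zero_cons]
    · simp [firstIdx, hx] at h
      obtain ⟨r', hr', hrr⟩ := h
      subst hrr
      simp [appendToFirst, hx, ih hr', List.modify_succ_cons]

lemma firstIdx_lt {rows : List (List String)} {x : String} {r : Nat}
    (h : firstIdx rows x = some r) : r < rows.length := by
  induction rows generalizing r with
  | nil => simp [firstIdx] at h
  | cons row rest ih =>
    by_cases hx : x ∈ row
    · simp [firstIdx, hx] at h; simp; omega
    · simp [firstIdx, hx] at h
      obtain ⟨r', hr', hrr⟩ := h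
      have := ih hr'
      simp; omega

lemma firstIdx_append (rows : List (List String)) (row : List String) (x : String) :
    firstIdx (rows ++ [row]) x =
      match firstIdx rows x with
      | some r => some r
      | none => if x ∈ row then some rows.length else none := by
  induction rows with
  | nil => simp [firstIdx]
  | cons r0 rest ih =>
    by_cases hx : x ∈ r0
    · simp [firstIdx, hx]
    · simp [firstIdx, hx, ih]
      cases h : firstIdx rest x with
      | some r => simp
      | none => by_cases hr : x ∈ row <;> simp [hr]

lemma firstIdx_modify (rows : List (List String)) (r : Nat) (v x : String)
    (hr : r < rows.length) :
    firstIdx (rows.modify r (fun row => row ++ [v])) x =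
      if x = v then
        match firstIdx rows x with
        | some e => some (min e r)
        | none => some r
      else firstIdx rows x := by
  induction rows generalizing r with
  | nil => simp at hr
  | cons row rest ih =>
    by_cases hxv : x = v
    · subst hxv
      cases r with
      | zero =>
        by_cases hx : x ∈ row
        · simp [List.modify_zero_cons, List.modify_succ_cons, firstIdx, hx]
        · simp [List.modify_zero_cons, List.modify_succ_cons, firstIdx, hx]
          cases h : firstIdx rest x <;> simp
      | succ r' =>
        have hr' : r' < rest.length := by simp at hr; omega
        by_cases hx : x ∈ row
        · simp [List.modify_zero_cons, List.modify_succ_cons, firstIdx, hx]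
        · simp [List.modify_zero_cons, List.modify_succ_cons, firstIdx, hx, ih r' hr']
          cases h : firstIdx rest x with
          | some e => simp [Nat.succ_min_succ]
          | none => simp
    · cases r with
      | zero =>
        by_cases hx : x ∈ row <;> simp [List.modify_zero_cons, List.modify_succ_cons, firstIdx, hx, hxv]
      | succ r' =>
        have hr' : r' < rest.length := by simp at hr; omega
        by_cases hx : x ∈ row <;> simp [List.modify_zero_cons, List.modify_succ_cons, firstIdx, hx, hxv, ih r' hr']

def GoodMap (first : PySem.Dict String Nat) (rows : List (List String)) : Prop :=
  ∀ x, PySem.Dict.get? first x = firstIdx rows x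

lemma altStep_fst {rows : List (List String)} {first : PySem.Dict String Nat}
    (hg : GoodMap first rows) (n1 n2 : String) :
    (altStep (rows, first) (n1, n2)).1 = operonStep rows n1 n2 := by
  cases h : firstIdx rows n1 with
  | none =>
    have hd : PySem.Dict.get? first n1 = none := (hg n1).trans h
    simp [altStep, hd, operonStep, frc_none h]
  | some r =>
    have hd : PySem.Dict.get? first n1 = some r := (hg n1).trans h
    obtain ⟨row, h1, h2⟩ := frc_some h
    have hne : ¬ row.isEmpty := by
      cases row with
      | nil => simp at h2
      | cons a t => simp [List.isEmpty]
    simp [altStep, hd, operonStep, h1, hne, appendToFirst_eq_modify h n2]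

lemma altStep_good {rows : List (List String)} {first : PySem.Dict String Nat}
    (hg : GoodMap first rows) (n1 n2 : String) :
    GoodMap (altStep (rows, first) (n1, n2)).2 (altStep (rows, first) (n1, n2)).1 := by
  cases h : firstIdx rows n1 with
  | none =>
    have hd : PySem.Dict.get? first n1 = none := (hg n1).trans h
    intro x
    simp only [altStep, hd]
    rw [firstIdx_append]
    by_cases hx2 : x = n2
    · subst hx2
      by_cases hx1 : x = n1
      · subst hx1
        simp [PySem.Dict.get?_insert, h]
      · cases h2 : firstIdx rows x with
        | some e =>
          have : PySem.Dict.get? (first.insert n1 rows.length) x = some e := by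
            simp [PySem.Dict.get?_insert, hx1, hg x, h2]
          simp [this, h2]
        | none =>
          have : PySem.Dict.get? (first.insert n1 rows.length) x = none := by
            simp [PySem.Dict.get?_insert, hx1, hg x, h2]
          simp [this, PySem.Dict.get?_insert, h2]
    · by_cases hx1 : x = n1
      · subst hx1
        by_cases hn : PySem.Dict.get? (first.insert x rows.length) n2 = none
        · simp [hn, PySem.Dict.get?_insert, Ne.symm hx2, h]
        · cases hv : PySem.Dict.get? (first.insert x rows.length) n2 with
          | none => exact absurd hv hn
          | some e => simp [hv, PySem.Dict.get?_insert, h]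
      · cases hv : PySem.Dict.get? (first.insert n1 rows.length) n2 with
        | none =>
          simp [hv, PySem.Dict.get?_insert, hx1, hx2, hg x]
          cases firstIdx rows x <;> simp [hx1, hx2]
        | some e =>
          simp [hv, PySem.Dict.get?_insert, hx1, hx2, hg x]
          cases firstIdx rows x <;> simp [hx1, hx2]
  | some r =>
    have hd : PySem.Dict.get? first n1 = some r := (hg n1).trans h
    have hr : r < rows.length := firstIdx_lt h
    intro x
    simp only [altStep, hd]
    rw [firstIdx_modify rows r n2 x hr]
    by_cases hx2 : x = n2
    · subst hx2
      cases h2 : firstIdx rows x with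
      | some e =>
        have hdx : PySem.Dict.get? first x = some e := (hg x).trans h2
        by_cases hre : r < e
        · simp [hdx, hre, PySem.Dict.get?_insert]; omega
        · simp [hdx, hre, hg x, h2]; omega
      | none =>
        have hdx : PySem.Dict.get? first x = none := (hg x).trans h2
        simp [hdx, PySem.Dict.get?_insert]
    · cases h2 : PySem.Dict.get? first n2 with
      | some e =>
        by_cases hre : r < e <;>
          simp [h2, hre, PySem.Dict.get?_insert, Ne.symm, hx2, hg x]
      | none => simp [h2, PySem.Dict.get?_insert, hx2, hg x]

lemma loop_eq (ps : List (String × String)) (rows : List (List String))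
    (first : PySem.Dict String Nat) (hg : GoodMap first rows) :
    ps.foldl (fun ops p => operonStep ops p.1 p.2) rows = (ps.foldl altStep (rows, first)).1 := by
  induction ps generalizing rows first with
  | nil => rfl
  | cons p rest ih =>
    obtain ⟨n1, n2⟩ := p
    have h1 := altStep_fst hg n1 n2
    have h2 := altStep_good hg n1 n2
    simp only [List.foldl_cons]
    rw [h1.symm]
    exact ih _ _ h2

lemma range_fold_eq_zip_fold (l1 l2 : List String) (s : List (List String))
    (h : l1.length ≤ l2.length) :
    (List.range l1.length).foldl (fun ops i => operonStep ops (l1.getD i "") (l2.getD i "")) s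
      = (l1.zip l2).foldl (fun ops p => operonStep ops p.1 p.2) s := by
  induction l1 generalizing l2 s with
  | nil => simp
  | cons a t ih =>
    cases l2 with
    | nil => simp at h
    | cons b u =>
      simp only [List.length_cons, List.range_succ_eq_map, List.foldl_cons, List.foldl_map,
        List.getD_cons_zero, List.zip_cons_cons]
      have := ih u (operonStep s a b) (by simpa using h)
      simpa [List.getD_cons_succ] using this

lemma good_empty : GoodMap PySem.Dict.empty [] := by
  intro x
  simp [PySem.Dict.get?, PySem.Dict.empty, firstIdx]

-- ===== VERDICT (by name: the statement is the Claim_ definition above) =====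
theorem build_operons_spec : Claim_equal_build_operons := by
  intro names1 names2 _ hpre
  unfold Spec_build_operons build_operons build_operons_alt
  rw [range_fold_eq_zip_fold names1 names2 [] hpre]
  exact loop_eq _ _ _ good_empty
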